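-- pv_equiv track=rewrite | github.com/markjoshwel/skills | python-majo/examples/examples.mulipea.py | _helper_clean_up_lyrics
-- ===== SOURCE A (Python) =====
-- def _helper_clean_up_lyrics(lyrics: str) -> str:
--     """
--     either the lyrics is .txt or .lrc: if its .txt, we dont do anything,
--     but if its a .lrc i'll start with [??:??.??] or something similar we remove that
--     """
--     new_lyrics: list[str] = []
--     for idx, line in enumerate(lyrics.strip().splitlines()):
--         if not line.startswith("["):
--             new_lyrics.append(line.strip())
--             continue
--         if "]" not in line:
--             new_lyrics.append(line.strip())
--             continue
--
--         # remove all ":" and "." characters inbeteen the brackets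
--         # then see if its all digits
--         # if it is, then its a timestamp and we should remove it
--
--         bracketed_portion: str = line[line.index("[") + 1 : line.index("]")]
--         if all(
--             [
--                 (c in "0123456789")
--                 for c in bracketed_portion.replace(":", "").replace(".", "")
--             ]
--         ):
--             new_lyrics.append(line[len(bracketed_portion) + 2 :].strip())
--         else:
--             new_lyrics.append(line.strip())
--
--     return "\n".join(new_lyrics).strip()
-- ===== SOURCE B (Python) =====
-- _TIMESTAMP_CHARS = "0123456789:."
--
--
-- def _clean_line(line: str) -> str:
--     # scan the anchored pattern "[" [0-9:.]* "]" directly; on a match drop it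
--     if line[:1] == "[":
--         i = 1
--         while i < len(line) and line[i] in _TIMESTAMP_CHARS:
--             i += 1
--         if i < len(line) and line[i] == "]":
--             return line[i + 1 :].strip()
--     return line.strip()
--
--
-- def _helper_clean_up_lyrics(lyrics: str) -> str:
--     return "\n".join(_clean_line(line) for line in lyrics.strip().splitlines()).strip()
-- ===== Notes on version B (the rewrite author's own statement) =====
-- stated objective: simpler
-- what changed: Per line, instead of locating the first ']' with index() and then validating the bracketed substring via two replace() passes and an all-digits list, B scans the anchored pattern '[' [0-9:.]* ']' left-to-right in one pass and drops it on a match; the early-continue/append loop becomes a per-line helper mapped and joined.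
import Mathlib
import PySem

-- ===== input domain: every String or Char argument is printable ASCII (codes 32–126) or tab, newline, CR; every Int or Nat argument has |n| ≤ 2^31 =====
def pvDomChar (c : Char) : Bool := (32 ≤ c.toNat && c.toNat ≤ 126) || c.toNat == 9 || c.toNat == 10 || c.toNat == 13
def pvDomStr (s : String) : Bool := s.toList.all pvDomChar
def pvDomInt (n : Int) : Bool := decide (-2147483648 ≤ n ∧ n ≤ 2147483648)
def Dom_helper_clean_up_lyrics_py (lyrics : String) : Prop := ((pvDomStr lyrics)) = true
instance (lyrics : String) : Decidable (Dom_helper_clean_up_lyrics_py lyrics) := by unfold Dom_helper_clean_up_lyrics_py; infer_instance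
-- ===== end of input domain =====

set_option maxHeartbeats 1000000

-- B replaces A's per-line index()/replace()/replace()/all() validation by a single left-to-right
-- scan of the anchored pattern '[' [0-9:.]* ']' (simpler decomposition; same results).

-- ===== PORT A =====
-- literal port of _helper_clean_up_lyrics; line.index("[")/line.index("]") are reached only under
-- the startswith/"]"-in-line guards, where they equal PySem.Str.find (the substring is present).
def helper_clean_up_lyrics_py (lyrics : String) : String :=
  let new_lyrics : List String :=
    (PySem.Str.splitlines (PySem.Str.strip lyrics)).foldl
      (fun new_lyrics line =>
        if !(PySem.Str.startswith line "[") then new_lyrics ++ [PySem.Str.strip line]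
        else if !(PySem.Str.isIn "]" line) then new_lyrics ++ [PySem.Str.strip line]
        else
          let bracketed : String :=
            PySem.Str.slice line (some (PySem.Str.find line "[" + 1)) (some (PySem.Str.find line "]"))
          if ((PySem.Str.replace (PySem.Str.replace bracketed ":" "") "." "").toList.map
                (fun c => PySem.Str.isIn (String.ofList [c]) "0123456789")).all id then
            new_lyrics ++ [PySem.Str.strip (PySem.Str.slice line (some (PySem.Str.len bracketed + 2)) none)]
          else new_lyrics ++ [PySem.Str.strip line]) []
  PySem.Str.strip (PySem.Str.join "\n" new_lyrics)

-- ===== PORT B =====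
-- the membership test `c in _TIMESTAMP_CHARS` of Source B (single character, so substring = element)
def pvClassP (c : Char) : Bool := PySem.Chars.isIn [c] "0123456789:.".toList

-- Source B's while loop over line[1:]: advance while the char is in the class; then the `line[i] == "]"`
-- test; `some rest` carries line[i+1:]. Structural recursion over the remaining chars = the index loop.
def pvRun : List Char → Option (List Char)
  | [] => none
  | c :: cs =>
    if pvClassP c then pvRun cs
    else if c = ']' then some cs
    else none

-- port of _clean_line
def pvCleanLine (line : String) : String :=
  if PySem.Str.slice line none (some 1) = "[" then
    match pvRun (PySem.List.slice line.toList (some 1) none) with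
    | some rest => PySem.Str.strip (String.ofList rest)
    | none => PySem.Str.strip line
  else PySem.Str.strip line

-- port of Source B's _helper_clean_up_lyrics
def helper_clean_up_lyrics_py_alt (lyrics : String) : String :=
  PySem.Str.strip (PySem.Str.join "\n"
    ((PySem.Str.splitlines (PySem.Str.strip lyrics)).map pvCleanLine))

-- ===== PRECONDITION & SPEC =====
def Spec_helper_clean_up_lyrics_py (lyrics : String) (out : String) : Prop := out = helper_clean_up_lyrics_py_alt lyrics
instance (lyrics : String) (out : String) : Decidable (Spec_helper_clean_up_lyrics_py lyrics out) := by unfold Spec_helper_clean_up_lyrics_py; infer_instance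

-- ===== CLAIM (what is proved, stated in full; the proofs are below) =====
def Claim_equal_helper_clean_up_lyrics_py : Prop := ∀ (lyrics : String), Dom_helper_clean_up_lyrics_py lyrics → Spec_helper_clean_up_lyrics_py lyrics (helper_clean_up_lyrics_py lyrics)

-- ===== LEMMAS AND PROOFS =====

-- A's per-line value, factored out of the foldl body
def pvALine (line : String) : String :=
  if !(PySem.Str.startswith line "[") then PySem.Str.strip line
  else if !(PySem.Str.isIn "]" line) then PySem.Str.strip line
  else
    let bracketed : String :=
      PySem.Str.slice line (some (PySem.Str.find line "[" + 1)) (some (PySem.Str.find line "]"))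
    if ((PySem.Str.replace (PySem.Str.replace bracketed ":" "") "." "").toList.map
          (fun c => PySem.Str.isIn (String.ofList [c]) "0123456789")).all id then
      PySem.Str.strip (PySem.Str.slice line (some (PySem.Str.len bracketed + 2)) none)
    else PySem.Str.strip line

theorem pv_singleton_infix (a : Char) (s : List Char) : [a] <:+: s ↔ a ∈ s := by
  constructor
  · intro h; exact h.sublist.mem (by simp)
  · intro h
    obtain ⟨u, v, rfl⟩ := List.append_of_mem h
    exact ⟨u, v, by simp⟩

theorem pv_isIn_singleton (a : Char) (s : List Char) :
    PySem.Chars.isIn [a] s = true ↔ a ∈ s := by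
  rw [PySem.Chars.isIn_iff_infix]; exact pv_singleton_infix a s

theorem pv_toList_inj {s t : String} (h : s.toList = t.toList) : s = t := by
  have := congrArg String.ofList h
  rwa [String.ofList_toList, String.ofList_toList] at this

theorem pv_strip_congr {s t : String} (h : s.toList = t.toList) :
    PySem.Str.strip s = PySem.Str.strip t := by
  unfold PySem.Str.strip; rw [h]

theorem pv_class_mem {c : Char} (h : pvClassP c = true) : c ∈ "0123456789:.".toList :=
  (pv_isIn_singleton _ _).mp h

theorem pv_class_of_mem {c : Char} (h : c ∈ "0123456789:.".toList) : pvClassP c = true :=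
  (pv_isIn_singleton _ _).mpr h

theorem pv_digits_sub {c : Char} (h : c ∈ "0123456789".toList) : c ∈ "0123456789:.".toList := by
  rw [show "0123456789:.".toList = "0123456789".toList ++ [':', '.'] from by decide]
  exact List.mem_append_left _ h

theorem pv_class_digit {c : Char} (h : pvClassP c = true) (h1 : c ≠ ':') (h2 : c ≠ '.') :
    c ∈ "0123456789".toList := by
  have hm := pv_class_mem h
  rw [show "0123456789:.".toList = "0123456789".toList ++ [':', '.'] from by decide] at hm
  rcases List.mem_append.mp hm with h' | h'
  · exact h'
  · simp at h'; rcases h' with h' | h' <;> contradiction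

theorem pv_mem_first_decomp {a : Char} {xs : List Char} (h : a ∈ xs) :
    ∃ u v, xs = u ++ a :: v ∧ a ∉ u := by
  induction xs with
  | nil => simp at h
  | cons x t ih =>
    by_cases hx : x = a
    · exact ⟨[], t, by simp [hx], by simp⟩
    · have ht : a ∈ t := by
        rcases List.mem_cons.mp h with h' | h'
        · exact absurd h'.symm hx
        · exact h'
      obtain ⟨u, v, rfl, hu⟩ := ih ht
      exact ⟨x :: u, v, rfl, by simp [hu, Ne.symm hx]⟩

theorem pv_find_first {s u v : List Char} {a : Char} (h : s = u ++ a :: v) (hu : a ∉ u) :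
    PySem.Chars.find s [a] = (u.length : Int) := by
  have hmem : a ∈ s := by rw [h]; simp
  have hnn : 0 ≤ PySem.Chars.find s [a] :=
    (PySem.Chars.find_nonneg_iff s [a]).mpr ((pv_singleton_infix a s).mpr hmem)
  obtain ⟨hpre, hmin⟩ := PySem.Chars.find_spec hnn
  set f := (PySem.Chars.find s [a]).toNat with hfdef
  have hle : f ≤ u.length := by
    by_contra hgt
    rw [Nat.not_le] at hgt
    exact hmin u.length hgt ⟨v, by rw [h, List.drop_left]; rfl⟩
  have hge : u.length ≤ f := by
    by_contra hlt
    rw [Nat.not_le] at hlt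
    obtain ⟨t, ht⟩ := hpre
    have hhead : s[f]? = some a := by
      rw [← List.head?_drop, ← ht]; rfl
    rw [h] at hhead
    rw [List.getElem?_append_left hlt] at hhead
    exact hu (List.mem_of_getElem? hhead)
  omega

theorem pv_replace_go_single (a : Char) : ∀ (fuel : Nat) (l acc : List Char), l.length ≤ fuel →
    PySem.Chars.replace.go [a] [] fuel l acc = acc.reverse ++ l.filter (fun c => c != a) := by
  intro fuel
  induction fuel with
  | zero =>
    intro l acc h
    have hl : l = [] := List.eq_nil_of_length_eq_zero (Nat.le_zero.mp h)
    subst hl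
    simp [PySem.Chars.replace.go]
  | succ n ih =>
    intro l acc h
    cases l with
    | nil => simp [PySem.Chars.replace.go]
    | cons c t =>
      have hlen : t.length ≤ n := by simpa using h
      by_cases hc : c = a
      · subst hc
        have hp : [c].isPrefixOf (c :: t) = true := by simp [List.isPrefixOf]
        simp only [PySem.Chars.replace.go, hp, if_true, List.length_cons, List.length_nil,
          List.drop_succ_cons, List.drop_zero, List.reverse_nil, List.nil_append]
        rw [ih t acc hlen]
        simp
      · have hp : [a].isPrefixOf (c :: t) = false := by
          simp [List.isPrefixOf, Ne.symm hc]
        simp only [PySem.Chars.replace.go, hp, Bool.false_eq_true, if_false]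
        rw [ih t (c :: acc) hlen]
        simp [hc]

theorem pv_replace_single (l : List Char) (a : Char) :
    PySem.Chars.replace l [a] [] = l.filter (fun c => c != a) := by
  have h := pv_replace_go_single a l.length l [] (le_refl _)
  simpa [PySem.Chars.replace] using h

theorem pv_pvRun_nil {cs : List Char} (h : cs.dropWhile pvClassP = []) : pvRun cs = none := by
  induction cs with
  | nil => rfl
  | cons c t ih =>
    rw [List.dropWhile_cons] at h
    by_cases hc : pvClassP c
    · rw [if_pos hc] at h
      simp [pvRun, hc, ih h]
    · rw [if_neg hc] at h
      simp at h
theorem pv_pvRun_rb {cs t : List Char} (h : cs.dropWhile pvClassP = ']' :: t) :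
    pvRun cs = some t := by
  induction cs with
  | nil => simp at h
  | cons c cs' ih =>
    rw [List.dropWhile_cons] at h
    by_cases hc : pvClassP c
    · rw [if_pos hc] at h
      simp [pvRun, hc, ih h]
    · rw [if_neg hc] at h
      injection h with h1 h2
      subst h1; subst h2
      simp [pvRun, hc]
theorem pv_pvRun_other {cs t : List Char} {d : Char} (h : cs.dropWhile pvClassP = d :: t)
    (hd : d ≠ ']') : pvRun cs = none := by
  induction cs with
  | nil => simp at h
  | cons c cs' ih =>
    rw [List.dropWhile_cons] at h
    by_cases hc : pvClassP c
    · rw [if_pos hc] at h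
      simp [pvRun, hc, ih h]
    · rw [if_neg hc] at h
      injection h with h1 h2
      subst h1
      simp [pvRun, hc, hd]

theorem pv_dropWhile_head {p : Char → Bool} : ∀ {l : List Char} {d : Char} {t : List Char},
    l.dropWhile p = d :: t → p d = false := by
  intro l
  induction l with
  | nil => intro d t h; simp at h
  | cons x xs ih =>
    intro d t h
    rw [List.dropWhile_cons] at h
    by_cases hx : p x
    · rw [if_pos hx] at h; exact ih h
    · rw [if_neg hx] at h
      injection h with h1 h2
      subst h1
      exact Bool.eq_false_iff.mpr hx

theorem pv_aLine_eq (line : String) : pvALine line = pvCleanLine line := by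
  rcases hl : line.toList with _ | ⟨c, cs⟩
  · -- empty line (cannot actually come out of splitlines, but the lemma is total)
    have hsw : PySem.Str.startswith line "[" = false := by
      rw [PySem.Str.startswith, hl]; decide
    have hBc : ¬ (PySem.Str.slice line none (some 1) = "[") := by
      intro he
      have h2 := congrArg String.toList he
      rw [show ("[" : String).toList = ['['] from by decide, PySem.Str.slice,
        String.toList_ofList, PySem.Chars.slice_eq_listSlice,
        PySem.List.slice_to _ (by norm_num : (0:Int) ≤ 1), hl] at h2
      simp at h2
    unfold pvALine pvCleanLine
    rw [hsw, if_neg hBc]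
    simp
  by_cases hc : c = '['
  case neg =>
    have hsw : PySem.Str.startswith line "[" = false := by
      rw [PySem.Str.startswith, hl, show ("[" : String).toList = ['['] from by decide]
      simp [PySem.Chars.startswith, List.isPrefixOf]
      exact Ne.symm hc
    have hBc : ¬ (PySem.Str.slice line none (some 1) = "[") := by
      intro he
      have h2 := congrArg String.toList he
      rw [show ("[" : String).toList = ['['] from by decide, PySem.Str.slice,
        String.toList_ofList, PySem.Chars.slice_eq_listSlice,
        PySem.List.slice_to _ (by norm_num : (0:Int) ≤ 1), hl] at h2
      simp at h2
      exact hc h2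
    unfold pvALine pvCleanLine
    rw [hsw, if_neg hBc]
    simp
  case pos =>
    subst hc
    -- line.toList = '[' :: cs
    have hsw : PySem.Str.startswith line "[" = true := by
      rw [PySem.Str.startswith, hl, show ("[" : String).toList = ['['] from by decide]
      exact (PySem.Chars.startswith_iff _ _).mpr ⟨cs, rfl⟩
    have hBc : PySem.Str.slice line none (some 1) = "[" := by
      apply pv_toList_inj
      rw [show ("[" : String).toList = ['['] from by decide, PySem.Str.slice,
        String.toList_ofList, PySem.Chars.slice_eq_listSlice,
        PySem.List.slice_to _ (by norm_num : (0:Int) ≤ 1), hl]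
      simp
    have hdrop1 : PySem.List.slice line.toList (some 1) none = cs := by
      rw [hl, PySem.List.slice_from_one]; rfl
    have hBeq : pvCleanLine line =
        (match pvRun cs with
         | some rest => PySem.Str.strip (String.ofList rest)
         | none => PySem.Str.strip line) := by
      unfold pvCleanLine
      rw [if_pos hBc, hdrop1]
    have hpreP : ∀ x ∈ cs.takeWhile pvClassP, pvClassP x = true :=
      fun x hx => List.mem_takeWhile_imp hx
    have hrb_pre : ']' ∉ cs.takeWhile pvClassP := by
      intro hmem
      have := hpreP _ hmem
      rw [show pvClassP ']' = false from by decide] at this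
      exact Bool.false_ne_true this
    rcases hsuf : cs.dropWhile pvClassP with _ | ⟨d, tail⟩
    · -- no char after the class run: cs is all class chars, no ']' anywhere
      have hcs : cs = cs.takeWhile pvClassP := by
        conv_lhs => rw [← List.takeWhile_append_dropWhile (p := pvClassP) (l := cs)]
        rw [hsuf, List.append_nil]
      have hnotin : PySem.Str.isIn "]" line = false := by
        rw [PySem.Str.isIn, show ("]" : String).toList = [']'] from by decide]
        rw [Bool.eq_false_iff]
        intro h
        have hm := (pv_isIn_singleton _ _).mp h
        rw [hl] at hm
        rcases List.mem_cons.mp hm with h' | h'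
        · exact absurd h' (by decide)
        · rw [hcs] at h'; exact hrb_pre h'
      rw [hBeq, pv_pvRun_nil hsuf]
      unfold pvALine
      rw [hsw, hnotin]
      simp
    · have hcseq : cs = cs.takeWhile pvClassP ++ d :: tail := by
        conv_lhs => rw [← List.takeWhile_append_dropWhile (p := pvClassP) (l := cs)]
        rw [hsuf]
      have hdP : pvClassP d = false := pv_dropWhile_head hsuf
      by_cases hdr : d = ']'
      · subst hdr
        -- timestamp shape: "[" ++ pre ++ "]" ++ tail
        have hlineq : line.toList = ('[' :: cs.takeWhile pvClassP) ++ ']' :: tail := by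
          rw [hl]
          conv_lhs => rw [hcseq]
          rfl
        have hfind0 : PySem.Str.find line "[" = 0 := by
          rw [PySem.Str.find, show ("[" : String).toList = ['['] from by decide]
          have := pv_find_first (s := line.toList) (u := []) (v := cs) (a := '[')
            (by simpa using hl) (by simp)
          simpa using this
        have hfindb : PySem.Str.find line "]" =
            (((cs.takeWhile pvClassP).length + 1 : Nat) : Int) := by
          rw [PySem.Str.find, show ("]" : String).toList = [']'] from by decide]
          have hnotu : ']' ∉ ('[' :: cs.takeWhile pvClassP) := by
            intro hmem
            rcases List.mem_cons.mp hmem with h' | h'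
            · exact absurd h' (by decide)
            · exact hrb_pre h'
          have := pv_find_first hlineq hnotu
          rw [this]
          simp
        have hisin : PySem.Str.isIn "]" line = true := by
          rw [PySem.Str.isIn, show ("]" : String).toList = [']'] from by decide]
          exact (pv_isIn_singleton _ _).mpr (by rw [hlineq]; simp)
        have hbrack : (PySem.Str.slice line (some (PySem.Str.find line "[" + 1))
            (some (PySem.Str.find line "]"))).toList = cs.takeWhile pvClassP := by
          rw [hfind0, hfindb, PySem.Str.slice, String.toList_ofList,
            PySem.Chars.slice_eq_listSlice,
            PySem.List.slice_toNat _ (by norm_num) (by exact_mod_cast Nat.zero_le _)]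
          rw [hlineq]
          simp only [zero_add, Int.toNat_one, Int.toNat_natCast, List.cons_append,
            List.drop_succ_cons, List.drop_zero, Nat.add_sub_cancel]
          exact List.take_left
        have hlen : PySem.Str.len (PySem.Str.slice line (some (PySem.Str.find line "[" + 1))
            (some (PySem.Str.find line "]"))) = ((cs.takeWhile pvClassP).length : Int) := by
          rw [PySem.Str.len, hbrack]
        have hcheckE : ((PySem.Str.replace (PySem.Str.replace
            (PySem.Str.slice line (some (PySem.Str.find line "[" + 1))
              (some (PySem.Str.find line "]"))) ":" "") "." "").toList.map
            (fun c => PySem.Str.isIn (String.ofList [c]) "0123456789")).all id = true := by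
          rw [PySem.Str.toList_replace, PySem.Str.toList_replace, hbrack,
            show (":" : String).toList = [':'] from by decide,
            show ("." : String).toList = ['.'] from by decide,
            show ("" : String).toList = [] from by decide,
            pv_replace_single, pv_replace_single]
          rw [List.all_eq_true]
          intro b hb
          rw [List.mem_map] at hb
          obtain ⟨x, hx, rfl⟩ := hb
          rw [List.mem_filter] at hx
          obtain ⟨hx1, hx2⟩ := hx
          rw [List.mem_filter] at hx1
          obtain ⟨hx0, hx1⟩ := hx1
          have hdig : x ∈ "0123456789".toList :=
            pv_class_digit (hpreP x hx0) (by simpa using hx1) (by simpa using hx2)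
          show PySem.Str.isIn (String.ofList [x]) "0123456789" = true
          rw [PySem.Str.isIn, String.toList_ofList]
          exact (pv_isIn_singleton _ _).mpr hdig
        have hslice2 : (PySem.Str.slice line
            (some (((cs.takeWhile pvClassP).length : Int) + 2)) none).toList = tail := by
          rw [PySem.Str.slice, String.toList_ofList, PySem.Chars.slice_eq_listSlice,
            PySem.List.slice_from _ (by positivity)]
          have hgroup : line.toList = (('[' :: cs.takeWhile pvClassP) ++ [']']) ++ tail := by
            rw [hlineq]; simp
          rw [hgroup]
          apply List.drop_left'
          simp only [List.length_append, List.length_cons, List.length_nil]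
          omega
        have hg1 : ¬ ((!PySem.Str.startswith line "[") = true) := by rw [hsw]; decide
        have hg2 : ¬ ((!PySem.Str.isIn "]" line) = true) := by rw [hisin]; decide
        rw [hBeq, pv_pvRun_rb hsuf]
        simp only [pvALine]
        rw [if_neg hg1, if_neg hg2, if_pos hcheckE, hlen]
        apply pv_strip_congr
        rw [hslice2, String.toList_ofList]
      · -- the char ending the class run is not ']': no timestamp; both sides just strip
        rw [hBeq, pv_pvRun_other hsuf hdr]
        by_cases hin : PySem.Str.isIn "]" line = true
        · -- there is a ']' further right, but the bracketed portion contains the non-class d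
          have hmtail : ']' ∈ tail := by
            have hm : ']' ∈ line.toList := by
              have := hin
              rw [PySem.Str.isIn, show ("]" : String).toList = [']'] from by decide] at this
              exact (pv_isIn_singleton _ _).mp this
            rw [hl] at hm
            rcases List.mem_cons.mp hm with h' | h'
            · exact absurd h' (by decide)
            · rw [hcseq] at h'
              rcases List.mem_append.mp h' with h'' | h''
              · exact absurd h'' hrb_pre
              · rcases List.mem_cons.mp h'' with h3 | h3
                · exact absurd h3.symm hdr
                · exact h3
          obtain ⟨m, r, hmr, hnm⟩ := pv_mem_first_decomp hmtail
          have hlineq : line.toList = ('[' :: (cs.takeWhile pvClassP ++ d :: m)) ++ ']' :: r := by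
            rw [hl]; conv_lhs => rw [hcseq, hmr]
            simp
          have hfind0 : PySem.Str.find line "[" = 0 := by
            rw [PySem.Str.find, show ("[" : String).toList = ['['] from by decide]
            have := pv_find_first (s := line.toList) (u := []) (v := cs) (a := '[')
              (by simpa using hl) (by simp)
            simpa using this
          have hfindb : PySem.Str.find line "]" =
              (((cs.takeWhile pvClassP).length + 1 + m.length + 1 : Nat) : Int) := by
            rw [PySem.Str.find, show ("]" : String).toList = [']'] from by decide]
            have hnotu : ']' ∉ ('[' :: (cs.takeWhile pvClassP ++ d :: m)) := by
              intro hmem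
              rcases List.mem_cons.mp hmem with h' | h'
              · exact absurd h' (by decide)
              · rcases List.mem_append.mp h' with h'' | h''
                · exact hrb_pre h''
                · rcases List.mem_cons.mp h'' with h3 | h3
                  · exact hdr h3.symm
                  · exact hnm h3
            have := pv_find_first hlineq hnotu
            rw [this]
            congr 1
            simp only [List.length_cons, List.length_append]
            omega
          have hbrack : (PySem.Str.slice line (some (PySem.Str.find line "[" + 1))
              (some (PySem.Str.find line "]"))).toList = cs.takeWhile pvClassP ++ d :: m := by
            rw [hfind0, hfindb, PySem.Str.slice, String.toList_ofList,
              PySem.Chars.slice_eq_listSlice,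
              PySem.List.slice_toNat _ (by norm_num) (by exact_mod_cast Nat.zero_le _)]
            rw [hlineq]
            simp only [zero_add, Int.toNat_one, Int.toNat_natCast, List.cons_append,
              List.drop_succ_cons, List.drop_zero, Nat.add_sub_cancel]
            apply List.take_left'
            simp only [List.length_append, List.length_cons]
            omega
          have hcheckE : ((PySem.Str.replace (PySem.Str.replace
              (PySem.Str.slice line (some (PySem.Str.find line "[" + 1))
                (some (PySem.Str.find line "]"))) ":" "") "." "").toList.map
              (fun c => PySem.Str.isIn (String.ofList [c]) "0123456789")).all id = false := by
            rw [PySem.Str.toList_replace, PySem.Str.toList_replace, hbrack,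
              show (":" : String).toList = [':'] from by decide,
              show ("." : String).toList = ['.'] from by decide,
              show ("" : String).toList = [] from by decide,
              pv_replace_single, pv_replace_single]
            have hd1 : d ≠ ':' := by
              intro h; rw [h] at hdP
              exact absurd hdP (by decide)
            have hd2 : d ≠ '.' := by
              intro h; rw [h] at hdP
              exact absurd hdP (by decide)
            rw [Bool.eq_false_iff]
            intro hall
            rw [List.all_eq_true] at hall
            have hdmem : d ∈ ((cs.takeWhile pvClassP ++ d :: m).filter
                (fun c => c != ':')).filter (fun c => c != '.') := by
              rw [List.mem_filter, List.mem_filter]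
              refine ⟨⟨by simp, by simpa using hd1⟩, by simpa using hd2⟩
            have := hall _ (List.mem_map_of_mem hdmem)
            show False
            have hdig : d ∈ "0123456789".toList := by
              have h2 : PySem.Str.isIn (String.ofList [d]) "0123456789" = true := this
              rw [PySem.Str.isIn, String.toList_ofList] at h2
              exact (pv_isIn_singleton _ _).mp h2
            have := pv_class_of_mem (pv_digits_sub hdig)
            rw [this] at hdP
            simp at hdP
          have hg1 : ¬ ((!PySem.Str.startswith line "[") = true) := by rw [hsw]; decide
          have hg2 : ¬ ((!PySem.Str.isIn "]" line) = true) := by rw [hin]; decide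
          simp only [pvALine]
          rw [if_neg hg1, if_neg hg2, if_neg (by rw [hcheckE]; exact Bool.false_ne_true)]
        · have hin' : PySem.Str.isIn "]" line = false := by
            rw [Bool.eq_false_iff]; exact hin
          unfold pvALine
          rw [hsw, hin']
          simp

theorem pv_fold_eq (lines : List String) :
    lines.foldl
      (fun new_lyrics line =>
        if !(PySem.Str.startswith line "[") then new_lyrics ++ [PySem.Str.strip line]
        else if !(PySem.Str.isIn "]" line) then new_lyrics ++ [PySem.Str.strip line]
        else
          let bracketed : String :=
            PySem.Str.slice line (some (PySem.Str.find line "[" + 1)) (some (PySem.Str.find line "]"))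
          if ((PySem.Str.replace (PySem.Str.replace bracketed ":" "") "." "").toList.map
                (fun c => PySem.Str.isIn (String.ofList [c]) "0123456789")).all id then
            new_lyrics ++ [PySem.Str.strip (PySem.Str.slice line (some (PySem.Str.len bracketed + 2)) none)]
          else new_lyrics ++ [PySem.Str.strip line]) []
      = lines.map pvALine := by
  have hbody : (fun (new_lyrics : List String) (line : String) =>
        if !(PySem.Str.startswith line "[") then new_lyrics ++ [PySem.Str.strip line]
        else if !(PySem.Str.isIn "]" line) then new_lyrics ++ [PySem.Str.strip line]
        else
          let bracketed : String :=
            PySem.Str.slice line (some (PySem.Str.find line "[" + 1)) (some (PySem.Str.find line "]"))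
          if ((PySem.Str.replace (PySem.Str.replace bracketed ":" "") "." "").toList.map
                (fun c => PySem.Str.isIn (String.ofList [c]) "0123456789")).all id then
            new_lyrics ++ [PySem.Str.strip (PySem.Str.slice line (some (PySem.Str.len bracketed + 2)) none)]
          else new_lyrics ++ [PySem.Str.strip line])
      = fun new_lyrics line => new_lyrics ++ [pvALine line] := by
    funext acc line
    simp only [pvALine]
    split_ifs <;> rfl
  rw [hbody, PySem.List.foldl_append_singleton_eq_map, List.nil_append]

-- ===== VERDICT (by name: the statement is the Claim_ definition above) =====
theorem helper_clean_up_lyrics_py_spec : Claim_equal_helper_clean_up_lyrics_py := by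
  intro lyrics _
  show helper_clean_up_lyrics_py lyrics = helper_clean_up_lyrics_py_alt lyrics
  simp only [helper_clean_up_lyrics_py, helper_clean_up_lyrics_py_alt]
  rw [pv_fold_eq, List.map_congr_left (fun line _ => pv_aLine_eq line)]
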